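-- pv_equiv track=rewrite | github.com/momsspaghettti/yandex-algorithms-trainings-3.0 | 0/5.py | get_max_string_goodness
-- ===== SOURCE A (Python) =====
-- from typing import List
--
-- def get_max_string_goodness(letter_counts: List[int]) -> int:
--     n = len(letter_counts)
--     if n < 2:
--         return 0
--
--     min_id = 0
--     min_ = letter_counts[min_id]
--     for i in range(1, n):
--         if letter_counts[i] < min_:
--             min_ = letter_counts[i]
--             min_id = i
--
--     return (n - 1) * min_ + \
--         get_max_string_goodness([c - min_ for c in letter_counts[:min_id]]) + \
--         get_max_string_goodness([c - min_ for c in letter_counts[min_id + 1:]])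
-- ===== SOURCE B (Python) =====
-- from typing import List
--
-- def get_max_string_goodness(letter_counts: List[int]) -> int:
--     return sum(min(a, b) for a, b in zip(letter_counts, letter_counts[1:]))
-- ===== Notes on version B (the rewrite author's own statement) =====
-- stated objective: faster
-- what changed: Replaced A's recursive divide-and-conquer (find the minimum, split around it, recurse on min-shifted halves) by a single linear pass summing min over adjacent pairs.
import Mathlib
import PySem

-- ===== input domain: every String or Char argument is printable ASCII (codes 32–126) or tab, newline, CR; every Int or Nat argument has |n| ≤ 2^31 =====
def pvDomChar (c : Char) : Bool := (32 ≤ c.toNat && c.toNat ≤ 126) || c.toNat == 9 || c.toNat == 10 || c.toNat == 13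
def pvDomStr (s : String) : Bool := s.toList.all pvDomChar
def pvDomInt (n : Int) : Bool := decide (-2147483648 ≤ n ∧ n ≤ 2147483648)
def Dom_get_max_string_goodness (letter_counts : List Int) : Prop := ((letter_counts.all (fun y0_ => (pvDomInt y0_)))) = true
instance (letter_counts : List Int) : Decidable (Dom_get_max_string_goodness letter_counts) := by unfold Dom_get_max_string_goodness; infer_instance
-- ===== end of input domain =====

-- B replaces A's recursive divide-and-conquer at the minimum by one linear pass
-- summing min over adjacent pairs (objective: faster, O(n) vs A's worst-case O(n^2)).

-- ===== PORT A =====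
-- the body of A's "for i in range(1, n)" loop, updating (min_id, min_)
def pvStep (xs : List Int) (p : Int × Int) (i : Int) : Int × Int :=
  if PySem.List.pyGetD xs i 0 < p.2 then (i, PySem.List.pyGetD xs i 0) else p

-- characterisation of the min-finding loop; the port's termination proof cites it
lemma pvFold_inv (xs : List Int) : ∀ (fuel t : Nat) (p : Int × Int),
    xs.length - t ≤ fuel → t ≤ xs.length →
    (∃ k : Nat, k < t ∧ p = ((k : Int), xs.getD k 0) ∧ ∀ x ∈ xs.take t, p.2 ≤ x) →
    ∃ k : Nat, k < xs.length ∧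
      ((PySem.List.pyRange (t : Int) (xs.length : Int) 1).foldl (pvStep xs) p)
        = ((k : Int), xs.getD k 0) ∧
      ∀ x ∈ xs, xs.getD k 0 ≤ x := by
  intro fuel
  induction fuel with
  | zero =>
    intro t p hfuel ht hinv
    have ht' : t = xs.length := by omega
    subst ht'
    rw [PySem.List.pyRange_one_eq_nil (by omega)]
    obtain ⟨k, hk, hp, hle⟩ := hinv
    subst hp
    exact ⟨k, by omega, rfl, fun x hx => hle x (by simpa using hx)⟩
  | succ f ih =>
    intro t p hfuel ht hinv
    by_cases hlt : t < xs.length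
    · rw [PySem.List.pyRange_one_cons (by exact_mod_cast hlt)]
      simp only [List.foldl_cons]
      have hcast : ((t : Int) + 1) = ((t + 1 : Nat) : Int) := by push_cast; ring
      rw [hcast]
      apply ih (t + 1) _ (by omega) (by omega)
      obtain ⟨k, hk, hp, hle⟩ := hinv
      have htake : xs.take (t + 1) = xs.take t ++ [xs[t]] := by
        rw [List.take_add_one]
        simp [List.getElem?_eq_getElem hlt]
      unfold pvStep
      rw [PySem.List.pyGetD_natCast]
      have hget : xs.getD t 0 = xs[t] := List.getD_eq_getElem xs 0 hlt
      by_cases hc : xs.getD t 0 < p.2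
      · rw [if_pos hc]
        refine ⟨t, by omega, by simp, ?_⟩
        intro x hx
        rw [htake] at hx
        rcases List.mem_append.mp hx with hx | hx
        · have := hle x hx
          rw [← hget] at *
          omega
        · simp at hx
          simp [hx, ← hget]
      · rw [if_neg hc]
        refine ⟨k, by omega, hp, ?_⟩
        intro x hx
        rw [htake] at hx
        rcases List.mem_append.mp hx with hx | hx
        · exact hle x hx
        · simp at hx
          rw [hx, ← hget]
          omega
    · have ht' : t = xs.length := by omega
      subst ht'
      rw [PySem.List.pyRange_one_eq_nil (by omega)]
      obtain ⟨k, hk, hp, hle⟩ := hinv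
      subst hp
      exact ⟨k, by omega, rfl, fun x hx => hle x (by simpa using hx)⟩

-- the loop's result for n ≥ 2, starting from (0, xs[0]); cited by the port's decreasing_by
lemma pvSt_spec (xs : List Int) (h : 2 ≤ xs.length) :
    ∃ k : Nat, k < xs.length ∧
      ((PySem.List.pyRange 1 (xs.length : Int) 1).foldl (pvStep xs)
        (0, PySem.List.pyGetD xs 0 0)) = ((k : Int), xs.getD k 0) ∧
      ∀ x ∈ xs, xs.getD k 0 ≤ x := by
  have h0 : 0 < xs.length := by omega
  have hinit : ∃ k : Nat, k < 1 ∧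
      ((0 : Int), PySem.List.pyGetD xs 0 0) = ((k : Int), xs.getD k 0) ∧
      ∀ x ∈ xs.take 1, ((0 : Int), PySem.List.pyGetD xs 0 0).2 ≤ x := by
    refine ⟨0, by omega, by simp [PySem.List.pyGetD_zero], ?_⟩
    intro x hx
    have h1 : xs.take 1 = [xs[0]] := by
      cases xs with
      | nil => simp at h0
      | cons a t => simp
    rw [h1] at hx
    simp at hx
    subst hx
    simp [PySem.List.pyGetD_zero, List.getElem?_eq_getElem h0]
  have hres := pvFold_inv xs xs.length 1 (0, PySem.List.pyGetD xs 0 0)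
    (by omega) (by omega) hinit
  simpa using hres

def get_max_string_goodness (letter_counts : List Int) : Int :=
  if _h : (letter_counts.length : Int) < 2 then 0
  else
    let st := (PySem.List.pyRange 1 (letter_counts.length : Int) 1).foldl
      (pvStep letter_counts) (0, PySem.List.pyGetD letter_counts 0 0)
    ((letter_counts.length : Int) - 1) * st.2
      + get_max_string_goodness
          ((PySem.List.slice letter_counts none (some st.1)).map (fun c => c - st.2))
      + get_max_string_goodness
          ((PySem.List.slice letter_counts (some (st.1 + 1)) none).map (fun c => c - st.2))
  termination_by letter_counts.length
  decreasing_by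
  · obtain ⟨k, hk, heq, _⟩ := pvSt_spec letter_counts (by omega)
    rw [heq]
    simp only [PySem.List.slice_to_natCast, List.length_map, List.length_take]
    omega
  · obtain ⟨k, hk, heq, _⟩ := pvSt_spec letter_counts (by omega)
    rw [heq]
    have : ((k : Int) + 1) = ((k + 1 : Nat) : Int) := by push_cast; ring
    rw [this, PySem.List.slice_from_natCast]
    simp only [List.length_map, List.length_drop]
    omega

-- ===== PORT B =====
def get_max_string_goodness_alt (letter_counts : List Int) : Int :=
  ((letter_counts.zip (PySem.List.slice letter_counts (some 1) none)).map
    (fun p => min p.1 p.2)).sum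

-- ===== PRECONDITION & SPEC =====
def Spec_get_max_string_goodness (letter_counts : List Int) (out : Int) : Prop := out = get_max_string_goodness_alt letter_counts
instance (letter_counts : List Int) (out : Int) : Decidable (Spec_get_max_string_goodness letter_counts out) := by unfold Spec_get_max_string_goodness; infer_instance

-- ===== CLAIM (what is proved, stated in full; the proofs are below) =====
def Claim_equal_get_max_string_goodness : Prop := ∀ (letter_counts : List Int), Dom_get_max_string_goodness letter_counts → Spec_get_max_string_goodness letter_counts (get_max_string_goodness letter_counts)

-- ===== LEMMAS AND PROOFS =====

-- the common value: sum of min over adjacent pairs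
def pairSum : List Int → Int
  | a :: b :: t => min a b + pairSum (b :: t)
  | _ => 0

lemma pairSum_nil : pairSum [] = 0 := rfl
lemma pairSum_single (a : Int) : pairSum [a] = 0 := rfl

-- B computes pairSum
lemma alt_eq_pairSum (xs : List Int) : get_max_string_goodness_alt xs = pairSum xs := by
  unfold get_max_string_goodness_alt
  rw [PySem.List.slice_from_one]
  induction xs with
  | nil => simp [pairSum]
  | cons a t ih =>
    cases t with
    | nil => simp [pairSum]
    | cons b t' =>
      simp only [List.tail_cons] at ih ⊢
      simp only [List.zip_cons_cons, List.map_cons, List.sum_cons, ih]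
      simp [pairSum]

-- shifting every element down by m shifts pairSum by (len-1)*m
lemma pairSum_map_sub (xs : List Int) (m : Int) (h : xs ≠ []) :
    pairSum (xs.map (fun c => c - m)) = pairSum xs - ((xs.length : Int) - 1) * m := by
  induction xs with
  | nil => simp at h
  | cons a t ih =>
    cases t with
    | nil => simp [pairSum]
    | cons b t' =>
      simp only [List.map_cons] at ih ⊢
      have hmin : min (a - m) (b - m) = min a b - m := by omega
      simp only [pairSum, hmin, ih (by simp)]
      simp only [List.length_cons]
      push_cast
      ring

-- splitting pairSum at a global minimum
lemma pairSum_split (L R : List Int) (m : Int)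
    (hL : ∀ x ∈ L, m ≤ x) (hR : ∀ x ∈ R, m ≤ x) :
    pairSum (L ++ m :: R) =
      pairSum L + pairSum R + (if L = [] then 0 else m) + (if R = [] then 0 else m) := by
  induction L with
  | nil =>
    cases R with
    | nil => simp [pairSum]
    | cons r R' =>
      have hr : m ≤ r := hR r (by simp)
      have h1 : pairSum ([] ++ m :: r :: R') = min m r + pairSum (r :: R') := rfl
      rw [h1, min_eq_left hr]
      simp [pairSum_nil]
      omega
  | cons a L' ih =>
    have ha : m ≤ a := hL a (by simp)
    cases L' with
    | nil =>
      have h0 := ih (by simp)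
      simp only [List.nil_append] at h0
      have h1 : pairSum ([a] ++ m :: R) = min a m + pairSum (m :: R) := rfl
      rw [h1, min_eq_right ha, h0]
      simp [pairSum_nil, pairSum_single]
      omega
    | cons a' L'' =>
      have h0 := ih (fun x hx => hL x (by simp [hx]))
      have h1 : pairSum ((a :: a' :: L'') ++ m :: R) = min a a' + pairSum ((a' :: L'') ++ m :: R) := rfl
      have h2 : pairSum (a :: a' :: L'') = min a a' + pairSum (a' :: L'') := rfl
      rw [h1]
      simp only [List.cons_append] at h0 ⊢
      rw [h0, h2]
      simp
      ring

-- A computes pairSum: strong induction on length, splitting at the found minimum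
lemma a_eq_pairSum (xs : List Int) : get_max_string_goodness xs = pairSum xs := by
  suffices h : ∀ (n : Nat) (ys : List Int), ys.length ≤ n →
      get_max_string_goodness ys = pairSum ys from h xs.length xs le_rfl
  intro n
  induction n with
  | zero =>
    intro ys hy
    have : ys = [] := List.eq_nil_of_length_eq_zero (by omega)
    subst this
    rw [get_max_string_goodness]
    simp [pairSum]
  | succ n ih =>
    intro ys hy
    rw [get_max_string_goodness]
    by_cases hlen : (ys.length : Int) < 2
    · rw [dif_pos hlen]
      match ys with
      | [] => simp [pairSum]
      | [a] => simp [pairSum]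
      | a :: b :: t => simp at hlen; omega
    · rw [dif_neg hlen]
      have hn2 : 2 ≤ ys.length := by omega
      obtain ⟨k, hk, heq, hmin⟩ := pvSt_spec ys hn2
      simp only [heq]
      have hcast : ((k : Int) + 1) = ((k + 1 : Nat) : Int) := by push_cast; ring
      rw [PySem.List.slice_to_natCast, hcast, PySem.List.slice_from_natCast]
      set L := ys.take k with hLdef
      set R := ys.drop (k + 1) with hRdef
      set m := ys.getD k 0 with hmdef
      have hgetm : m = ys[k] := List.getD_eq_getElem ys 0 hk
      have hsplit : ys = L ++ m :: R := by
        rw [hLdef, hRdef, hgetm]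
        rw [List.getElem_cons_drop]
        exact (List.take_append_drop k ys).symm
      have hLlen : L.length = k := by simp [hLdef]; omega
      have hRlen : (R.length : Int) = (ys.length : Int) - k - 1 := by
        simp [hRdef]; omega
      have hLmem : ∀ x ∈ L, m ≤ x := fun x hx => hmin x (List.mem_of_mem_take hx)
      have hRmem : ∀ x ∈ R, m ≤ x := fun x hx => hmin x (List.mem_of_mem_drop hx)
      have hLrec : get_max_string_goodness (L.map (fun c => c - m))
          = pairSum (L.map (fun c => c - m)) := by
        apply ih; simp [hLlen]; omega
      have hRrec : get_max_string_goodness (R.map (fun c => c - m))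
          = pairSum (R.map (fun c => c - m)) := by
        apply ih
        have : R.length ≤ ys.length - 1 := by
          have := hRlen; omega
        simp only [List.length_map]
        omega
      rw [hLrec, hRrec]
      conv_rhs => rw [hsplit]
      rw [pairSum_split L R m hLmem hRmem]
      by_cases hL0 : L = []
      · have hk0 : k = 0 := by rw [hL0] at hLlen; simpa using hLlen.symm
        have hR0 : R ≠ [] := by
          intro hc
          rw [hc] at hRlen
          simp at hRlen
          omega
        rw [hL0]
        rw [pairSum_map_sub R m hR0]
        simp only [List.map_nil, pairSum_nil, if_neg hR0]
        rw [hRlen]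
        subst hk0
        push_cast
        ring
      · by_cases hR0 : R = []
        · have hkn : (k : Int) = (ys.length : Int) - 1 := by
            rw [hR0] at hRlen
            simp at hRlen
            omega
          rw [hR0]
          rw [pairSum_map_sub L m hL0]
          simp only [List.map_nil, pairSum_nil, if_neg hL0]
          rw [hLlen] at *
          rw [hkn]
          push_cast
          ring
        · rw [pairSum_map_sub L m hL0, pairSum_map_sub R m hR0]
          simp only [if_neg hL0, if_neg hR0]
          rw [hLlen, hRlen]
          ring

-- ===== VERDICT (by name: the statement is the Claim_ definition above) =====
theorem get_max_string_goodness_spec : Claim_equal_get_max_string_goodness := by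
  intro xs _
  unfold Spec_get_max_string_goodness
  rw [a_eq_pairSum, alt_eq_pairSum]
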